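-- pv_equiv track=rewrite | github.com/subodhss23/python_small_problems | hard_problems/pluralize.py | pluralize
-- ===== SOURCE A (Python) =====
-- def pluralize(lst):
--     new_lst = []
--     for i in lst:
--         if lst.count(i) > 1:
--             new_lst.append(i + 's')
--         else:
--             new_lst.append(i)
--     return set(new_lst)
-- ===== SOURCE B (Python) =====
-- def pluralize(lst):
--     # Iterative partition: peel off one distinct word per round, deciding
--     # duplication by membership in the remaining tail (no counting pass).
--     out = set()
--     rest = lst
--     while rest:
--         w, tail = rest[0], rest[1:]
--         out |= {w + 's'} if w in tail else {w}
--         rest = [x for x in tail if x != w]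
--     return out
-- ===== Notes on version B (the rewrite author's own statement) =====
-- stated objective: alternative
-- what changed: Instead of calling lst.count for every element, B repeatedly peels off the first remaining word, decides pluralization by membership in the rest, and filters all of its duplicates out before the next round, so each distinct word is handled once and the scanned list shrinks.
import Mathlib
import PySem

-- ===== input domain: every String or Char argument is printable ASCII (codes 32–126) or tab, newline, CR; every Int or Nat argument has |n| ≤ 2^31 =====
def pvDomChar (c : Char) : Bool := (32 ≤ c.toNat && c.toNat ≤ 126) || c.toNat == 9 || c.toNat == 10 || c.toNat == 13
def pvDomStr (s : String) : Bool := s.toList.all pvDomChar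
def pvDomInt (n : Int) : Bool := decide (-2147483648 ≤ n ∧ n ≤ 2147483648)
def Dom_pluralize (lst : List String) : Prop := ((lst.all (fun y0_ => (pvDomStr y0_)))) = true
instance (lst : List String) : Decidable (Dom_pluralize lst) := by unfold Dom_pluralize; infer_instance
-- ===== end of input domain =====

-- B peels off one distinct word per round (membership in the remaining tail decides pluralization,
-- the tail is then filtered), instead of A's per-element lst.count scan; alternative decomposition.


-- ===== PORT A =====
def pluralize (lst : List String) : List String :=
  let new_lst := lst.foldl
    (fun acc i => acc ++ [if PySem.List.count lst i > 1 then i ++ "s" else i]) []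
  PySem.Set.ofList new_lst

-- ===== PORT B =====
-- while rest: w, tail = rest[0], rest[1:]; out |= {w+'s'} if w in tail else {w}; rest = [x for x in tail if x != w]
def pluralizeLoop (out : PySem.Set String) (rest : List String) : PySem.Set String :=
  match rest with
  | [] => out
  | w :: tail =>
      pluralizeLoop
        (PySem.Set.union out (if tail.contains w then [w ++ "s"] else [w]))
        (tail.filter (fun x => x != w))
termination_by rest.length
decreasing_by
  simpa using Nat.lt_succ_of_le (List.length_filter_le _ _)

def pluralize_alt (lst : List String) : List String :=
  pluralizeLoop PySem.Set.empty lst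

-- ===== PRECONDITION & SPEC =====
def Spec_pluralize (lst : List String) (out : List String) : Prop := out = pluralize_alt lst
instance (lst : List String) (out : List String) : Decidable (Spec_pluralize lst out) := by unfold Spec_pluralize; infer_instance

-- ===== CLAIM (what is proved, stated in full; the proofs are below) =====
def Claim_equal_pluralize : Prop := ∀ (lst : List String), Dom_pluralize lst → Spec_pluralize lst (pluralize lst)

-- ===== LEMMAS AND PROOFS =====

-- membership is preserved by Set.add
theorem mem_add_of_mem {α : Type} [BEq α] [LawfulBEq α] (s : PySem.Set α) (y x : α)
    (h : x ∈ s) : x ∈ PySem.Set.add s y := by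
  by_cases hy : y ∈ s
  · rwa [PySem.Set.add_of_mem hy]
  · rw [PySem.Set.add_of_not_mem hy]; exact List.mem_append_left _ h

-- elements of l whose image under f is already in s may be dropped before an update with l.map f
theorem update_map_filter {α β : Type} [BEq β] [LawfulBEq β] (f : α → β) (p : α → Bool)
    (l : List α) (s : PySem.Set β) (h : ∀ x ∈ l, p x = false → f x ∈ s) :
    PySem.Set.update s ((l.filter p).map f) = PySem.Set.update s (l.map f) := by
  induction l generalizing s with
  | nil => rfl
  | cons x l ih =>
    by_cases hp : p x = true
    · simp only [List.filter_cons, hp, if_true, List.map_cons, PySem.Set.update_cons]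
      exact ih _ (fun y hy hpy => mem_add_of_mem _ _ _ (h y (List.mem_cons_of_mem _ hy) hpy))
    · have hpx : p x = false := by simpa using hp
      have hfx : f x ∈ s := h x (List.mem_cons_self) hpx
      simp only [List.filter_cons, hpx, Bool.false_eq_true, if_false, List.map_cons,
        PySem.Set.update_cons, PySem.Set.add_of_mem hfx]
      exact ih _ (fun y hy hpy => h y (List.mem_cons_of_mem _ hy) hpy)

-- x ∈ s.add x
theorem mem_add_self_lem {α : Type} [BEq α] [LawfulBEq α] (s : PySem.Set α) (x : α) :
    x ∈ PySem.Set.add s x := by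
  by_cases hx : x ∈ s
  · rwa [PySem.Set.add_of_mem hx]
  · rw [PySem.Set.add_of_not_mem hx]; exact List.mem_append_right _ (List.mem_singleton.mpr rfl)

-- loop invariant: while every element of rest has the same multiplicity in rest as in lst,
-- the loop computes s.update(map f rest), f being A's per-element mapping
theorem pluralizeLoop_eq (lst : List String) (n : Nat) (rest : List String) (s : PySem.Set String)
    (hn : rest.length ≤ n)
    (h : ∀ x ∈ rest, rest.count x = lst.count x) :
    pluralizeLoop s rest =
      PySem.Set.update s
        (rest.map (fun i => if PySem.List.count lst i > 1 then i ++ "s" else i)) := by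
  induction n generalizing rest s with
  | zero =>
    have : rest = [] := List.eq_nil_of_length_eq_zero (Nat.le_zero.mp hn)
    subst this; rw [pluralizeLoop]; rfl
  | succ n ih =>
    match rest with
    | [] => rw [pluralizeLoop]; rfl
    | w :: tail =>
      have hw : lst.count w = tail.count w + 1 := by
        rw [← h w (List.mem_cons_self)]; simp
      have hcond : (PySem.List.count (w :: tail) w > 1) = (tail.contains w) := by
        simp only [PySem.List.count_eq, List.count_cons_self]
        by_cases hm : w ∈ tail
        · have h0 : 0 < tail.count w := List.count_pos_iff.mpr hm
          simp only [List.contains_iff_mem]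
          simp only [eq_iff_iff]
          constructor
          · intro _; exact hm
          · intro _; omega
        · have : tail.count w = 0 := List.count_eq_zero.mpr hm
          simp [hm, this]

      rw [pluralizeLoop]
      have hcount : ∀ x ∈ tail.filter (fun x => x != w),
          (tail.filter (fun x => x != w)).count x = lst.count x := by
        intro x hx
        have hxm := List.mem_filter.mp hx
        have hxw : x ≠ w := by simpa using hxm.2
        rw [← h x (List.mem_cons_of_mem _ hxm.1)]
        simp [List.count_filter, hxw, Ne.symm hxw]
      have hlen : (tail.filter (fun x => x != w)).length ≤ n := by
        have := List.length_filter_le (fun x => x != w) tail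
        have : tail.length ≤ n := Nat.le_of_succ_le_succ (by simpa using hn)
        omega
      rw [ih _ _ hlen hcount]
      -- rewrite the added singleton as [f w]
      have hsing : (if tail.contains w then [w ++ "s"] else [w]) =
          [if PySem.List.count lst w > 1 then w ++ "s" else w] := by
        have hiff : (PySem.List.count lst w > 1) ↔ (tail.contains w = true) := by
          rw [iff_iff_eq, ← hcond]
          simp [PySem.List.count_eq, ← h w (List.mem_cons_self)]
        by_cases hc : tail.contains w = true
        · rw [if_pos hc, if_pos (hiff.mpr hc)]
        · rw [if_neg hc, if_neg (fun hgt => hc (hiff.mp hgt))]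
      rw [hsing]
      have hunion : PySem.Set.union s [if PySem.List.count lst w > 1 then w ++ "s" else w] =
          PySem.Set.add s (if PySem.List.count lst w > 1 then w ++ "s" else w) := by
        simp [PySem.Set.union, PySem.Set.update]
      rw [hunion, List.map_cons, PySem.Set.update_cons]
      apply update_map_filter
      intro x hx hpx
      have hxw : x = w := by simpa using hpx
      subst hxw
      exact mem_add_self_lem _ _

-- ===== VERDICT (by name: the statement is the Claim_ definition above) =====
theorem pluralize_spec : Claim_equal_pluralize := by
  intro lst _
  unfold Spec_pluralize pluralize pluralize_alt
  simp only [PySem.List.foldl_append_singleton_eq_map, List.nil_append]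
  rw [pluralizeLoop_eq lst lst.length lst PySem.Set.empty le_rfl (fun _ _ => rfl)]
  simp [PySem.Set.empty, PySem.Set.update_nil_left]
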